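-- pv_equiv track=rewrite | github.com/kts5927/algorithm | 백준/Bronze/25629. 홀짝 수열/홀짝 수열.py | is_valid_holjjaksu_sequence
-- ===== SOURCE A (Python) =====
-- def is_valid_holjjaksu_sequence(n, arr):
--     odds = sorted([x for x in arr if x % 2 == 1])
--     evens = sorted([x for x in arr if x % 2 == 0])
--
--     if len(odds) + len(evens) != n:
--         return 0
--
--     hol_idx = 0
--     jjk_idx = 0
--
--     for i in range(n):
--         if i % 2 == 0:
--             if hol_idx >= len(odds):
--                 return 0
--             hol_idx += 1
--         else:
--             if jjk_idx >= len(evens):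
--                 return 0
--             jjk_idx += 1
--
--     return 1
-- ===== SOURCE B (Python) =====
-- def is_valid_holjjaksu_sequence(n, arr):
--     if len(arr) != n:
--         return 0
--     odd = sum(1 for x in arr if x % 2 == 1)
--     return 1 if odd == (n + 1) // 2 else 0
-- ===== Notes on version B (the rewrite author's own statement) =====
-- stated objective: simpler
-- what changed: Drops the two dead sorts and replaces the position-by-position alternating consumption loop with a single odd-count pass and a closed-form threshold check odd == (n+1)//2.
import Mathlib
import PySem

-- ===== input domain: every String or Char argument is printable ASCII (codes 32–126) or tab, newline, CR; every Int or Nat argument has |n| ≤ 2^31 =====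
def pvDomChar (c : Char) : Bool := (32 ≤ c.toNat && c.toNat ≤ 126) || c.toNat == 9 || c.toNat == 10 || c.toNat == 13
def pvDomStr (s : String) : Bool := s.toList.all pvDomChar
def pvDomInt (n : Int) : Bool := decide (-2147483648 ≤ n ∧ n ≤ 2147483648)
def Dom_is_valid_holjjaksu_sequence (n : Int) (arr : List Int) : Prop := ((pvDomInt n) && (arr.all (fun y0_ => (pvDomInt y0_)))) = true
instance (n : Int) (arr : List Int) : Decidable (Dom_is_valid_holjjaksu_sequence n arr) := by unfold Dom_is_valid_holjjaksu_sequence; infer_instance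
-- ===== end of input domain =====

-- B drops the dead sorts and replaces A's alternating consumption loop with a closed-form
-- threshold check (odd count = (n+1)//2); same return value everywhere, simpler.

-- ===== PORT A =====
-- the 'for i in range(n)' loop with its two early returns, over the remaining range list
def pvLoopA : List Int → Int → Int → Int → Int → Int
  | [], _, _, _, _ => 1
  | i :: rest, hol_idx, jjk_idx, lenOdds, lenEvens =>
    if PySem.Int.mod i 2 == 0 then
      if hol_idx ≥ lenOdds then 0 else pvLoopA rest (hol_idx + 1) jjk_idx lenOdds lenEvens
    else
      if jjk_idx ≥ lenEvens then 0 else pvLoopA rest hol_idx (jjk_idx + 1) lenOdds lenEvens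

def is_valid_holjjaksu_sequence (n : Int) (arr : List Int) : Int :=
  let odds := PySem.List.sorted (arr.filter (fun x => PySem.Int.mod x 2 == 1)) (fun x => x) false
  let evens := PySem.List.sorted (arr.filter (fun x => PySem.Int.mod x 2 == 0)) (fun x => x) false
  if (odds.length : Int) + (evens.length : Int) ≠ n then 0
  else pvLoopA (PySem.List.pyRange 0 n 1) 0 0 (odds.length : Int) (evens.length : Int)

-- ===== PORT B =====
def is_valid_holjjaksu_sequence_alt (n : Int) (arr : List Int) : Int :=
  if PySem.List.len arr ≠ n then 0
  else
    let odd := (arr.filter (fun x => PySem.Int.mod x 2 == 1)).length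
    if (odd : Int) = PySem.Int.floordiv (n + 1) 2 then 1 else 0

-- ===== PRECONDITION & SPEC =====
def Spec_is_valid_holjjaksu_sequence (n : Int) (arr : List Int) (out : Int) : Prop := out = is_valid_holjjaksu_sequence_alt n arr
instance (n : Int) (arr : List Int) (out : Int) : Decidable (Spec_is_valid_holjjaksu_sequence n arr out) := by unfold Spec_is_valid_holjjaksu_sequence; infer_instance

-- ===== CLAIM (what is proved, stated in full; the proofs are below) =====
def Claim_equal_is_valid_holjjaksu_sequence : Prop := ∀ (n : Int) (arr : List Int), Dom_is_valid_holjjaksu_sequence n arr → Spec_is_valid_holjjaksu_sequence n arr (is_valid_holjjaksu_sequence n arr)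

-- ===== LEMMAS AND PROOFS =====

theorem pvMod_two (x : Int) : PySem.Int.mod x 2 = x % 2 :=
  PySem.Int.mod_eq_emod_of_pos (by norm_num)

-- the loop result depends only on how many even/odd indices remain vs the remaining capacity
theorem pvLoopA_eq (l : List Int) (hol jjk lo le : Int) (h1 : hol ≤ lo) (h2 : jjk ≤ le) :
    pvLoopA l hol jjk lo le =
      if ((l.filter (fun i => PySem.Int.mod i 2 == 0)).length : Int) ≤ lo - hol ∧
         ((l.filter (fun i => !(PySem.Int.mod i 2 == 0))).length : Int) ≤ le - jjk
      then 1 else 0 := by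
  induction l generalizing hol jjk with
  | nil =>
    simp [pvLoopA]
    constructor <;> omega
  | cons i rest ih =>
    rcases Int.even_or_odd i with he | ho
    · have hi : i % 2 = 0 := Int.even_iff.mp he
      have hb : (PySem.Int.mod i 2 == 0) = true := by rw [pvMod_two, hi]; rfl
      simp only [pvLoopA, hb, List.filter_cons, Bool.not_true, Bool.false_eq_true,
        if_true, if_false, List.length_cons]
      by_cases hcap : hol ≥ lo
      · rw [if_pos hcap, if_neg (by push_cast; omega)]
      · rw [if_neg hcap, ih (hol + 1) jjk (by omega) h2]
        by_cases hc : ((rest.filter (fun i => PySem.Int.mod i 2 == 0)).length : Int) ≤ lo - (hol + 1) ∧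
            ((rest.filter (fun i => !(PySem.Int.mod i 2 == 0))).length : Int) ≤ le - jjk
        · rw [if_pos hc, if_pos (by push_cast at hc ⊢; omega)]
        · rw [if_neg hc, if_neg (by push_cast at hc ⊢; omega)]
    · have hi : i % 2 = 1 := Int.odd_iff.mp ho
      have hb : (PySem.Int.mod i 2 == 0) = false := by rw [pvMod_two, hi]; rfl
      simp only [pvLoopA, hb, List.filter_cons, Bool.not_false, Bool.false_eq_true,
        if_true, if_false, List.length_cons]
      by_cases hcap : jjk ≥ le
      · rw [if_pos hcap, if_neg (by push_cast; omega)]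
      · rw [if_neg hcap, ih hol (jjk + 1) h1 (by omega)]
        by_cases hc : ((rest.filter (fun i => PySem.Int.mod i 2 == 0)).length : Int) ≤ lo - hol ∧
            ((rest.filter (fun i => !(PySem.Int.mod i 2 == 0))).length : Int) ≤ le - (jjk + 1)
        · rw [if_pos hc, if_pos (by push_cast at hc ⊢; omega)]
        · rw [if_neg hc, if_neg (by push_cast at hc ⊢; omega)]

-- counts of even / odd indices in range(m)
theorem pvRange_counts (m : Nat) :
    ((PySem.List.pyRange 0 (m : Int) 1).filter (fun i => PySem.Int.mod i 2 == 0)).length = (m + 1) / 2 ∧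
    ((PySem.List.pyRange 0 (m : Int) 1).filter (fun i => !(PySem.Int.mod i 2 == 0))).length = m / 2 := by
  induction m with
  | zero => simp [PySem.List.pyRange_one_eq_nil]
  | succ k ih =>
    have hc : (((k + 1 : Nat)) : Int) = (k : Int) + 1 := by push_cast; ring
    have hsplit : PySem.List.pyRange 0 ((k : Int) + 1) 1 =
        PySem.List.pyRange 0 (k : Int) 1 ++ [(k : Int)] := by
      rw [PySem.List.pyRange_one_append 0 (k : Int) ((k : Int) + 1) (by omega) (by omega)]
      congr 1
      rw [PySem.List.pyRange_one_cons (by omega), PySem.List.pyRange_one_eq_nil (by omega)]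
    rw [hc, hsplit]
    simp only [List.filter_append, List.length_append, ih.1, ih.2, List.filter_cons,
      List.filter_nil]
    rcases Nat.even_or_odd k with he | ho
    · have hk : k % 2 = 0 := Nat.even_iff.mp he
      have hi : (k : Int) % 2 = 0 := by omega
      have hb : (PySem.Int.mod (k : Int) 2 == 0) = true := by rw [pvMod_two, hi]; rfl
      simp only [hb, Bool.not_true, Bool.false_eq_true, if_true, if_false,
        List.length_cons, List.length_nil]
      omega
    · have hk : k % 2 = 1 := Nat.odd_iff.mp ho
      have hi : (k : Int) % 2 = 1 := by omega
      have hb : (PySem.Int.mod (k : Int) 2 == 0) = false := by rw [pvMod_two, hi]; rfl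
      simp only [hb, Bool.not_false, Bool.false_eq_true, if_true, if_false,
        List.length_cons, List.length_nil]
      omega

-- the two complementary parity filters partition arr
theorem pvParity_partition (arr : List Int) :
    (arr.filter (fun x => PySem.Int.mod x 2 == 1)).length +
    (arr.filter (fun x => PySem.Int.mod x 2 == 0)).length = arr.length := by
  induction arr with
  | nil => simp
  | cons x xs ih =>
    rcases Int.even_or_odd x with he | ho
    · have hx : x % 2 = 0 := Int.even_iff.mp he
      have hb1 : (PySem.Int.mod x 2 == 1) = false := by rw [pvMod_two, hx]; rfl
      have hb0 : (PySem.Int.mod x 2 == 0) = true := by rw [pvMod_two, hx]; rfl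
      simp only [List.filter_cons, hb1, hb0, Bool.false_eq_true, if_true,
        if_false, List.length_cons]
      omega
    · have hx : x % 2 = 1 := Int.odd_iff.mp ho
      have hb1 : (PySem.Int.mod x 2 == 1) = true := by rw [pvMod_two, hx]; rfl
      have hb0 : (PySem.Int.mod x 2 == 0) = false := by rw [pvMod_two, hx]; rfl
      simp only [List.filter_cons, hb1, hb0, Bool.false_eq_true, if_true,
        if_false, List.length_cons]
      omega

-- ===== VERDICT (by name: the statement is the Claim_ definition above) =====
theorem is_valid_holjjaksu_sequence_spec : Claim_equal_is_valid_holjjaksu_sequence := by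
  intro n arr _
  unfold Spec_is_valid_holjjaksu_sequence is_valid_holjjaksu_sequence is_valid_holjjaksu_sequence_alt
  simp only [PySem.List.length_sorted, PySem.List.len_eq]
  set lo := (arr.filter (fun x => PySem.Int.mod x 2 == 1)).length with hlo
  set le := (arr.filter (fun x => PySem.Int.mod x 2 == 0)).length with hle
  have hpart : lo + le = arr.length := pvParity_partition arr
  by_cases hn : (arr.length : Int) = n
  · have hsum : (lo : Int) + (le : Int) = n := by omega
    have hn0 : 0 ≤ n := by omega
    have hm : ((n.toNat : Nat) : Int) = n := Int.toNat_of_nonneg hn0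
    rw [if_neg (by omega : ¬((lo : Int) + (le : Int) ≠ n)),
        if_neg (by omega : ¬((arr.length : Int) ≠ n))]
    rw [pvLoopA_eq _ 0 0 _ _ (by positivity) (by positivity)]
    have hcounts := pvRange_counts n.toNat
    rw [hm] at hcounts
    rw [hcounts.1, hcounts.2, PySem.Int.floordiv_eq_ediv_of_pos (by norm_num)]
    split_ifs with hA hB hB
    · rfl
    · exfalso; omega
    · exfalso; omega
    · rfl
  · rw [if_pos (by omega : ((lo : Int) + (le : Int) ≠ n)),
        if_pos (by omega : ((arr.length : Int) ≠ n))]
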